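-- pv_equiv track=rewrite | github.com/MalangCowFarm/Algo_DaeHyun | 계절week/숫자 게임.py | solution
-- ===== SOURCE A (Python) =====
-- def solution(A, B):
--     A.sort()
--     B.sort()
--     j = cnt = 0
--     for i in A :
--         while j < len(B) :
--             if i < B[j] :
--                 cnt+=1
--                 j+=1
--                 break
--             else :
--                 j+=1
--         if j == len(B) :
--             break
--
--     return cnt
-- ===== SOURCE B (Python) =====
-- def solution(A, B):
--     A.sort()
--     B.sort()
--     ra = A[::-1]
--     rb = B[::-1]
--     cnt = 0
--     k = 0
--     for a in ra:
--         if k < len(rb) and a < rb[k]: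
--             cnt += 1
--             k += 1
--     return cnt
-- ===== Notes on version B (the rewrite author's own statement) =====
-- stated objective: alternative
-- what changed: A scans sorted A ascending with an inner while that advances a B index (skipping too-small B's, with a break when B is exhausted); B reverses both sorted lists and runs a single descending pass that matches the largest remaining B against each A-maximum, silently discarding A elements no B can beat -- the skip rule moves from B to A and the inner loop and break disappear.
import Mathlib
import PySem

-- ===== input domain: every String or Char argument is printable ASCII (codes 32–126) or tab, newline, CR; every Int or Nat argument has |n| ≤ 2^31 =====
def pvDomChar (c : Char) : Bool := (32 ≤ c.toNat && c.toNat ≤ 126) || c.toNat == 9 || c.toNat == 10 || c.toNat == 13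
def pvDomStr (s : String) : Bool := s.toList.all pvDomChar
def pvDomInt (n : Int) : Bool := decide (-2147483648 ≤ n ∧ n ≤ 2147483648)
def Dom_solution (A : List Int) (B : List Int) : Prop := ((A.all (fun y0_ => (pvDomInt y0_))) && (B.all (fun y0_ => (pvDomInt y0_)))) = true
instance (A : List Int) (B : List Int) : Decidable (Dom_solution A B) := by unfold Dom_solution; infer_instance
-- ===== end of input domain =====

-- B replaces A's ascending scan over A (inner while advancing a B-index, with break) by a
-- descending two-pointer pass over the reversed sorted lists that silently discards unbeatable
-- A-maxima (objective: alternative). Both A and B sort the argument lists in place (same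
-- mutation); the equivalence proved here is about the return value.

-- ===== PORT A =====
-- inner 'while j < len(B)' loop: returns the state (j, cnt) at exit or at 'break'
def innerA (sB : List Int) (a : Int) (j : Nat) (cnt : Int) : Nat × Int :=
  if h : j < sB.length then
    if a < sB[j] then (j + 1, cnt + 1)
    else innerA sB a (j + 1) cnt
  else (j, cnt)
termination_by sB.length - j

-- 'for i in A' loop with the 'if j == len(B): break'
def loopA (sB : List Int) : List Int → Nat → Int → Int
  | [], _, cnt => cnt
  | a :: rest, j, cnt =>
    let p := innerA sB a j cnt
    if p.1 = sB.length then p.2 else loopA sB rest p.1 p.2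

def solution (A : List Int) (B : List Int) : Int :=
  loopA (PySem.List.sorted B (fun x => x) false) (PySem.List.sorted A (fun x => x) false) 0 0

-- ===== PORT B =====
-- 'for a in ra' with pointer k into rb ('k < len(rb) and a < rb[k]')
def loopB (rb : List Int) : List Int → Nat → Int → Int
  | [], _, cnt => cnt
  | a :: ra, k, cnt =>
    if h : k < rb.length then
      if a < rb[k] then loopB rb ra (k + 1) (cnt + 1)
      else loopB rb ra k cnt
    else loopB rb ra k cnt

-- A[::-1] is ported as List.reverse (exact for step -1 full slices)
def solution_alt (A : List Int) (B : List Int) : Int :=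
  loopB ((PySem.List.sorted B (fun x => x) false).reverse)
        ((PySem.List.sorted A (fun x => x) false).reverse) 0 0

-- ===== PRECONDITION & SPEC =====
def Spec_solution (A : List Int) (B : List Int) (out : Int) : Prop := out = solution_alt A B
instance (A : List Int) (B : List Int) (out : Int) : Decidable (Spec_solution A B out) := by unfold Spec_solution; infer_instance

-- ===== CLAIM (what is proved, stated in full; the proofs are below) =====
def Claim_equal_solution : Prop := ∀ (A : List Int) (B : List Int), Dom_solution A B → Spec_solution A B (solution A B)

-- ===== LEMMAS AND PROOFS =====

-- functional form of A's greedy: consume B's low end with dropWhile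
def Ufn : List Int → List Int → Int
  | [], _ => 0
  | a :: as, bs =>
    match bs.dropWhile (fun b => decide (b ≤ a)) with
    | [] => 0
    | _ :: t => 1 + Ufn as t

-- functional form of B's greedy on the descending lists
def Dfn : List Int → List Int → Int
  | [], _ => 0
  | _ :: _, [] => 0
  | a :: ras, b :: rbs => if a < b then 1 + Dfn ras rbs else Dfn ras (b :: rbs)

theorem Ufn_nil (as : List Int) : Ufn as [] = 0 := by
  cases as <;> simp [Ufn]

theorem Dfn_nil (ras : List Int) : Dfn ras [] = 0 := by
  cases ras <;> simp [Dfn]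

theorem suffix_drop_eq {t sB : List Int} (h : t <:+ sB) :
    sB.drop (sB.length - t.length) = t := by
  obtain ⟨u, rfl⟩ := h
  simp

theorem innerA_char (sB : List Int) (a : Int) (j : Nat) (cnt : Int) (hj : j ≤ sB.length) :
    innerA sB a j cnt =
      match (sB.drop j).dropWhile (fun b => decide (b ≤ a)) with
      | [] => (sB.length, cnt)
      | _ :: t => (sB.length - t.length, cnt + 1) := by
  induction j using innerA.induct (sB := sB) (a := a) with
  | case1 j h hlt =>
    rw [innerA, dif_pos h, if_pos hlt, List.drop_eq_getElem_cons h, List.dropWhile_cons]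
    have hd : (decide (sB[j] ≤ a)) = false := by simp only [decide_eq_false_iff_not]; omega
    rw [hd]
    simp only [Bool.false_eq_true, if_false, List.length_drop, Prod.mk.injEq]
    exact ⟨by omega, trivial⟩
  | case2 j h hlt ih =>
    rw [innerA, dif_pos h, if_neg hlt, ih (by omega), List.drop_eq_getElem_cons h, List.dropWhile_cons]
    have hd : (decide (sB[j] ≤ a)) = true := by simp only [decide_eq_true_eq]; omega
    rw [hd]
    simp only [if_true]
  | case3 j h =>
    rw [innerA, dif_neg h]
    have hje : j = sB.length := by omega
    subst hje
    simp

theorem loopA_char (sB as : List Int) (j : Nat) (cnt : Int) (hj : j ≤ sB.length) :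
    loopA sB as j cnt = cnt + Ufn as (sB.drop j) := by
  induction as generalizing j cnt with
  | nil => simp [loopA, Ufn]
  | cons a rest ih =>
    simp only [loopA]
    rw [innerA_char sB a j cnt hj]
    cases hdw : (sB.drop j).dropWhile (fun b => decide (b ≤ a)) with
    | nil => simp [hdw, Ufn]
    | cons y t =>
      have hsuf : (y :: t) <:+ sB := by
        rw [← hdw]; exact (List.dropWhile_suffix _).trans (List.drop_suffix j sB)
      have hts : t <:+ sB := (List.suffix_cons y t).trans hsuf
      have hlt : t.length < sB.length := by
        have := hsuf.length_le; simp at this; omega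
      have hdrop : sB.drop (sB.length - t.length) = t := suffix_drop_eq hts
      by_cases hE : sB.length - t.length = sB.length
      · have h0 : t.length = 0 := by omega
        have ht : t = [] := by cases t with | nil => rfl | cons z zs => simp at h0
        subst ht
        simp [Ufn, hdw, Ufn_nil]
      · simp only [if_neg hE]
        rw [ih _ _ (by omega), hdrop]
        simp [Ufn, hdw]
        ring

theorem loopB_char (rb ra : List Int) (k : Nat) (cnt : Int) :
    loopB rb ra k cnt = cnt + Dfn ra (rb.drop k) := by
  induction ra generalizing k cnt with
  | nil => simp [loopB, Dfn]
  | cons a ra ih =>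
    by_cases h : k < rb.length
    · rw [List.drop_eq_getElem_cons h]
      simp only [loopB, dif_pos h]
      by_cases hab : a < rb[k]
      · rw [if_pos hab, ih]
        simp [Dfn, hab]
        ring
      · rw [if_neg hab, ih, List.drop_eq_getElem_cons h]
        simp [Dfn, hab]
    · have hnil : rb.drop k = [] := List.drop_eq_nil_of_le (by omega)
      simp only [loopB, dif_neg h]
      rw [ih, hnil, Dfn_nil, Dfn_nil]

theorem Ufn_append_skip (as bs : List Int) (a : Int) (hb : ∀ b ∈ bs, b ≤ a) :
    Ufn (as ++ [a]) bs = Ufn as bs := by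
  induction as generalizing bs with
  | nil =>
    have hdw : bs.dropWhile (fun b => decide (b ≤ a)) = [] := by
      rw [List.dropWhile_eq_nil_iff]
      intro x hx; simpa using hb x hx
    simp [Ufn, hdw]
  | cons a' as ih =>
    simp only [List.cons_append, Ufn]
    cases hdw : bs.dropWhile (fun b => decide (b ≤ a')) with
    | nil => rfl
    | cons y t =>
      have hsub : t ⊆ bs := fun x hx =>
        (List.dropWhile_sublist (l := bs) (p := fun b => decide (b ≤ a'))).subset
          (by rw [hdw]; exact List.mem_cons_of_mem y hx)
      show 1 + Ufn (as ++ [a]) t = 1 + Ufn as t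
      rw [ih t (fun b hb' => hb b (hsub hb'))]

theorem Ufn_append_match (as : List Int) (a b : Int) (bs : List Int)
    (ha : ∀ x ∈ as, x ≤ a) (hb : ∀ y ∈ bs, y ≤ b) (hab : a < b) :
    Ufn (as ++ [a]) (bs ++ [b]) = 1 + Ufn as bs := by
  induction as generalizing bs with
  | nil =>
    cases hdw : (bs ++ [b]).dropWhile (fun x => decide (x ≤ a)) with
    | nil =>
      exfalso
      rw [List.dropWhile_eq_nil_iff] at hdw
      have := hdw b (by simp)
      simp at this
      omega
    | cons y t => simp [Ufn, hdw]
  | cons a' as ih =>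
    have ha'b : ¬ (b ≤ a') := by
      have := ha a' (by simp)
      omega
    cases hdw : bs.dropWhile (fun x => decide (x ≤ a')) with
    | nil =>
      have hdw2 : (bs ++ [b]).dropWhile (fun x => decide (x ≤ a')) = [b] := by
        rw [List.dropWhile_append, hdw]
        simp [ha'b]
      simp only [List.cons_append, Ufn, hdw, hdw2, Ufn_nil]
    | cons y t =>
      have hdw2 : (bs ++ [b]).dropWhile (fun x => decide (x ≤ a')) = y :: (t ++ [b]) := by
        rw [List.dropWhile_append, hdw]
        simp
      have hsub : t ⊆ bs := fun x hx =>
        (List.dropWhile_sublist (l := bs) (p := fun b => decide (b ≤ a'))).subset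
          (by rw [hdw]; exact List.mem_cons_of_mem y hx)
      simp only [List.cons_append, Ufn, hdw, hdw2]
      show 1 + Ufn (as ++ [a]) (t ++ [b]) = 1 + (1 + Ufn as t)
      rw [ih t (fun x hx => ha x (List.mem_cons_of_mem a' hx)) (fun y' hy' => hb y' (hsub hy'))]

theorem Ufn_eq_Dfn (xs : List Int) : ∀ ys : List Int,
    xs.Pairwise (fun x y => y ≤ x) → ys.Pairwise (fun x y => y ≤ x) →
    Ufn xs.reverse ys.reverse = Dfn xs ys := by
  induction xs with
  | nil => intro ys _ _; simp [Ufn, Dfn]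
  | cons a xs ih =>
    intro ys hx hy
    rw [List.pairwise_cons] at hx
    obtain ⟨hax, hx'⟩ := hx
    cases ys with
    | nil => simp [Dfn, Ufn_nil]
    | cons b ys =>
      rw [List.pairwise_cons] at hy
      obtain ⟨hby, hy'⟩ := hy
      simp only [List.reverse_cons]
      by_cases hab : a < b
      · rw [Ufn_append_match xs.reverse a b ys.reverse
            (fun x hx => hax x (List.mem_reverse.mp hx))
            (fun y hy => hby y (List.mem_reverse.mp hy)) hab]
        rw [ih ys hx' hy']
        simp [Dfn, hab]
      · rw [Ufn_append_skip xs.reverse (ys.reverse ++ [b]) a (by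
          intro x hx
          rcases List.mem_append.mp hx with h | h
          · have := hby x (List.mem_reverse.mp h); omega
          · have hxb : x = b := by simpa using h
            omega)]
        have := ih (b :: ys) hx' (List.pairwise_cons.mpr ⟨hby, hy'⟩)
        simp only [List.reverse_cons] at this
        rw [this]
        simp [Dfn, hab]

-- ===== VERDICT (by name: the statement is the Claim_ definition above) =====
theorem solution_spec : Claim_equal_solution := by
  intro A B _
  unfold Spec_solution solution solution_alt
  rw [loopA_char _ _ _ _ (Nat.zero_le _), loopB_char]
  simp only [List.drop_zero]
  have hA := PySem.List.sorted_pairwise (xs := A) (key := fun x => x)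
  have hB := PySem.List.sorted_pairwise (xs := B) (key := fun x => x)
  have := Ufn_eq_Dfn ((PySem.List.sorted A (fun x => x) false).reverse)
      ((PySem.List.sorted B (fun x => x) false).reverse)
      (by rw [List.pairwise_reverse]; exact hA)
      (by rw [List.pairwise_reverse]; exact hB)
  simp only [List.reverse_reverse] at this
  omega
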